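-- pv_equiv track=rewrite | github.com/inchan/reading-list | scripts/generate-wiki-rss.py | first_body_paragraph
-- ===== SOURCE A (Python) =====
-- def first_body_paragraph(body: str) -> str:
--     paragraph: list[str] = []
--     for raw_line in body.splitlines():
--         line = raw_line.strip()
--         if not line:
--             if paragraph:
--                 break
--             continue
--         if line.startswith("#"):
--             continue
--         if line.startswith("|") or line.startswith("```"):
--             continue
--         paragraph.append(line)
--
--     return " ".join(paragraph).strip()
-- ===== SOURCE B (Python) =====
-- def first_body_paragraph(body: str) -> str:
--     # Build blank-line-separated blocks of stripped non-empty lines first, then select.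
--     blocks: list[list[str]] = []
--     cur: list[str] = []
--     for raw_line in body.splitlines():
--         line = raw_line.strip()
--         if line:
--             cur.append(line)
--         else:
--             if cur:
--                 blocks.append(cur)
--                 cur = []
--     if cur:
--         blocks.append(cur)
--     for block in blocks:
--         content = [l for l in block
--                    if not (l.startswith("#") or l.startswith("|") or l.startswith("```"))]
--         if content:
--             return " ".join(content).strip()
--     return ""
-- ===== Notes on version B (the rewrite author's own statement) =====
-- stated objective: alternative
-- what changed: A's single scan with an early break is replaced by a two-phase decomposition: first group the stripped non-blank lines into blank-separated blocks, then return the joined filtered content of the first block whose filtered content is non-empty.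
import Mathlib
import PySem

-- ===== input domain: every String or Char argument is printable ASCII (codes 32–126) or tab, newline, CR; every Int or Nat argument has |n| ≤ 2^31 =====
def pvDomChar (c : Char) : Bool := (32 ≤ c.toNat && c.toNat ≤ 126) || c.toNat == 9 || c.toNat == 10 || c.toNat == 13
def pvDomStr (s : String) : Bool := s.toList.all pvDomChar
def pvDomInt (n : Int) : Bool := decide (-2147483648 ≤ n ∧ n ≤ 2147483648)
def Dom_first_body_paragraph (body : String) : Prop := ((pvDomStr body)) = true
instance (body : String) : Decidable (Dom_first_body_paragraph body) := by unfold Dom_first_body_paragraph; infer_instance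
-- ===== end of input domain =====

-- B restructures A's single scan-with-break into two phases — group the stripped lines into
-- blank-separated blocks, then return the first block with filtered content (objective: alternative).

-- ===== PORT A =====
-- A's loop: accumulate stripped content lines, break at the first blank line after content.
def fbpLoopA : List String → List String → List String
  | [], paragraph => paragraph
  | raw_line :: rest, paragraph =>
    let line := PySem.Str.strip raw_line
    if line = "" then
      if paragraph ≠ [] then paragraph else fbpLoopA rest paragraph
    else if PySem.Str.startswith line "#" then fbpLoopA rest paragraph
    else if PySem.Str.startswith line "|" || PySem.Str.startswith line "```" then
      fbpLoopA rest paragraph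
    else fbpLoopA rest (paragraph ++ [line])

def first_body_paragraph (body : String) : String :=
  PySem.Str.strip (PySem.Str.join " " (fbpLoopA (PySem.Str.splitlines body) []))

-- ===== PORT B =====
-- B phase 1: group the consecutive non-blank stripped lines into blocks.
def fbpGroupB : List String → List String → List (List String) → List (List String)
  | [], cur, blocks => if cur ≠ [] then blocks ++ [cur] else blocks
  | raw_line :: rest, cur, blocks =>
    let line := PySem.Str.strip raw_line
    if line ≠ "" then fbpGroupB rest (cur ++ [line]) blocks
    else if cur ≠ [] then fbpGroupB rest [] (blocks ++ [cur])
    else fbpGroupB rest cur blocks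

-- B phase 2: first block whose filtered content is non-empty.
def fbpSelectB : List (List String) → String
  | [] => ""
  | b :: rest =>
    let content := b.filter (fun l =>
      !(PySem.Str.startswith l "#" || PySem.Str.startswith l "|" || PySem.Str.startswith l "```"))
    if content ≠ [] then PySem.Str.strip (PySem.Str.join " " content) else fbpSelectB rest

def first_body_paragraph_alt (body : String) : String :=
  fbpSelectB (fbpGroupB (PySem.Str.splitlines body) [] [])

-- ===== PRECONDITION & SPEC =====
def Spec_first_body_paragraph (body : String) (out : String) : Prop := out = first_body_paragraph_alt body
instance (body : String) (out : String) : Decidable (Spec_first_body_paragraph body out) := by unfold Spec_first_body_paragraph; infer_instance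

-- ===== CLAIM (what is proved, stated in full; the proofs are below) =====
def Claim_equal_first_body_paragraph : Prop := ∀ (body : String), Dom_first_body_paragraph body → Spec_first_body_paragraph body (first_body_paragraph body)

-- ===== LEMMAS AND PROOFS =====

def fbpKeep (l : String) : Bool :=
  !(PySem.Str.startswith l "#" || PySem.Str.startswith l "|" || PySem.Str.startswith l "```")

theorem fbpGroupB_blocks (lines : List String) : ∀ (cur : List String)
    (blocks : List (List String)), fbpGroupB lines cur blocks = blocks ++ fbpGroupB lines cur [] := by
  induction lines with
  | nil => intro cur blocks; simp [fbpGroupB]; split_ifs <;> simp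
  | cons raw rest ih =>
    intro cur blocks
    simp only [fbpGroupB]
    split_ifs with h1 h2
    · exact ih _ _
    · rw [ih [] (blocks ++ [cur]), ih [] ([] ++ [cur])]; simp
    · exact ih _ _

theorem fbpSelectB_skip (blocks : List (List String))
    (h : ∀ b ∈ blocks, b.filter fbpKeep = []) (rest : List (List String)) :
    fbpSelectB (blocks ++ rest) = fbpSelectB rest := by
  induction blocks with
  | nil => rfl
  | cons b bs ih =>
    have hb : b.filter fbpKeep = [] := h b (by simp)
    simp only [List.cons_append, fbpSelectB]
    rw [show (fun l => !(PySem.Str.startswith l "#" || PySem.Str.startswith l "|" ||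
        PySem.Str.startswith l "```")) = fbpKeep from rfl, hb]
    simp only [ne_eq, not_true_eq_false, reduceIte]
    exact ih (fun b hb' => h b (by simp [hb']))

theorem fbpMain (lines : List String) : ∀ (cur : List String),
    PySem.Str.strip (PySem.Str.join " " (fbpLoopA lines (cur.filter fbpKeep)))
      = fbpSelectB (fbpGroupB lines cur []) := by
  induction lines with
  | nil =>
    intro cur
    simp only [fbpLoopA, fbpGroupB]
    by_cases hc : cur = []
    · subst hc; simp [fbpSelectB]; decide
    · rw [if_pos hc]
      simp only [List.nil_append, fbpSelectB]
      rw [show (fun l => !(PySem.Str.startswith l "#" || PySem.Str.startswith l "|" ||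
          PySem.Str.startswith l "```")) = fbpKeep from rfl]
      by_cases hf : cur.filter fbpKeep = []
      · rw [hf]; decide
      · rw [if_pos hf]
  | cons raw rest ih =>
    intro cur
    simp only [fbpLoopA, fbpGroupB]
    by_cases hb : PySem.Str.strip raw = ""
    · rw [if_pos hb, if_neg (not_not_intro hb)]
      by_cases hp : List.filter fbpKeep cur = []
      · rw [if_neg (not_not_intro hp), hp]
        by_cases hc : cur = []
        · rw [if_neg (not_not_intro hc), ← hp]
          exact ih cur
        · have hskip := fbpSelectB_skip ([] ++ [cur])
            (fun b hb' => by
              simp only [List.nil_append, List.mem_singleton] at hb'; subst hb'; exact hp)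
            (fbpGroupB rest [] [])
          rw [if_pos hc, fbpGroupB_blocks rest [] ([] ++ [cur]), hskip]
          have := ih []
          rwa [show List.filter fbpKeep [] = [] from rfl] at this
      · have hc : cur ≠ [] := fun h => hp (by rw [h]; rfl)
        rw [if_pos hp, if_pos hc, fbpGroupB_blocks rest [] ([] ++ [cur])]
        simp only [List.nil_append, List.singleton_append, fbpSelectB]
        rw [show (fun l => !(PySem.Str.startswith l "#" || PySem.Str.startswith l "|" ||
            PySem.Str.startswith l "```")) = fbpKeep from rfl]
        rw [if_pos hp]
    · rw [if_neg hb, if_pos hb]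
      have key : PySem.Str.strip (PySem.Str.join " " (fbpLoopA rest
            (List.filter fbpKeep (cur ++ [PySem.Str.strip raw]))))
          = fbpSelectB (fbpGroupB rest (cur ++ [PySem.Str.strip raw]) []) := ih _
      by_cases hk : fbpKeep (PySem.Str.strip raw) = true
      · have h3 : ¬ PySem.Str.startswith (PySem.Str.strip raw) "#" = true := by
          simp only [fbpKeep, Bool.not_eq_true'] at hk
          simp only [Bool.or_eq_false_iff] at hk
          simp only [hk.1.1]; decide
        have h4 : ¬ (PySem.Str.startswith (PySem.Str.strip raw) "|" ||
            PySem.Str.startswith (PySem.Str.strip raw) "```") = true := by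
          simp only [fbpKeep, Bool.not_eq_true'] at hk
          simp only [Bool.or_eq_false_iff] at hk
          simp only [hk.1.2, hk.2]; decide
        rw [if_neg h3, if_neg h4]
        rwa [List.filter_append,
          show List.filter fbpKeep [PySem.Str.strip raw] = [PySem.Str.strip raw] from by
            simp [hk]] at key
      · rw [List.filter_append,
          show List.filter fbpKeep [PySem.Str.strip raw] = [] from by
            simp only [Bool.not_eq_true] at hk
            simp [hk], List.append_nil] at key
        have hk' : (PySem.Str.startswith (PySem.Str.strip raw) "#"
            || PySem.Str.startswith (PySem.Str.strip raw) "|"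
            || PySem.Str.startswith (PySem.Str.strip raw) "```") = true := by
          simp only [Bool.not_eq_true, fbpKeep, Bool.not_eq_false'] at hk
          exact hk
        by_cases h3 : PySem.Str.startswith (PySem.Str.strip raw) "#" = true
        · rw [if_pos h3]; exact key
        · have h4 : (PySem.Str.startswith (PySem.Str.strip raw) "|" ||
              PySem.Str.startswith (PySem.Str.strip raw) "```") = true := by
            simp only [Bool.or_eq_true] at hk' ⊢
            rcases hk' with (h | h) | h
            · exact absurd h h3
            · exact Or.inl h
            · exact Or.inr h
          rw [if_neg h3, if_pos h4]
          exact key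

-- ===== VERDICT (by name: the statement is the Claim_ definition above) =====
theorem first_body_paragraph_spec : Claim_equal_first_body_paragraph := by
  intro body _
  unfold Spec_first_body_paragraph first_body_paragraph first_body_paragraph_alt
  have := fbpMain (PySem.Str.splitlines body) []
  rwa [show List.filter fbpKeep [] = [] from rfl] at this
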